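-- pv_equiv track=rewrite | github.com/Alialmandoz/TaskFlow | generateContext.py | generate_tree_structure_markdown
-- ===== SOURCE A (Python) =====
-- def generate_tree_structure_markdown(file_paths, root_display_name="."):
--     """Genera una representación de árbol en formato Markdown."""
--     tree_lines = ["```text", root_display_name] # Iniciar bloque de código y añadir nombre raíz
--
--     # Construir una estructura jerárquica a partir de las rutas de archivo
--     path_map = {}
--     for p in sorted(file_paths):
--         parts = p.split('/') # Asumimos rutas normalizadas con '/'
--         current_level = path_map
--         for i, part in enumerate(parts):
--             is_last_part = (i == len(parts) - 1)
--             # Si es la última parte, es un archivo. Si no, es un directorio.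
--             # Para el árbol, tratamos todo como nodos que pueden o no tener hijos.
--             if part not in current_level:
--                 current_level[part] = {} # Crear un nuevo nodo (puede ser archivo o dir)
--             current_level = current_level[part]
--
--     def build_lines_recursive(current_level_map, prefix=""):
--         entries = sorted(current_level_map.keys())
--         for i, entry_name in enumerate(entries):
--             is_last_entry_in_level = (i == len(entries) - 1)
--             connector = "└── " if is_last_entry_in_level else "├── "
--             tree_lines.append(f"{prefix}{connector}{entry_name}")
--
--             # Si este 'entry_name' tiene un diccionario no vacío como valor, es un directorio.
--             if isinstance(current_level_map[entry_name], dict) and current_level_map[entry_name]: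
--                 new_prefix = prefix + ("    " if is_last_entry_in_level else "│   ")
--                 build_lines_recursive(current_level_map[entry_name], new_prefix)
--
--     build_lines_recursive(path_map)
--     tree_lines.append("```")
--     return "\n".join(tree_lines)
-- ===== SOURCE B (Python) =====
-- def generate_tree_structure_markdown(file_paths, root_display_name="."):
--     """Genera una representación de árbol en formato Markdown."""
--     def render(paths, prefix):
--         # paths: list of non-empty component lists
--         groups = {}
--         for p in paths:
--             groups.setdefault(p[0], []).append(p[1:])
--         lines = []
--         names = sorted(groups)
--         for i, name in enumerate(names):
--             is_last = (i == len(names) - 1)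
--             connector = "└── " if is_last else "├── "
--             lines.append(f"{prefix}{connector}{name}")
--             children = [s for s in groups[name] if s]
--             if children:
--                 lines += render(children, prefix + ("    " if is_last else "│   "))
--         return lines
--
--     body = render([p.split('/') for p in sorted(file_paths)], "")
--     return "\n".join(["```text", root_display_name] + body + ["```"])
-- ===== Notes on version B (the rewrite author's own statement) =====
-- stated objective: alternative
-- what changed: B drops A's mutable nested-dict tree (build path_map once, then walk it recursively): it recurses directly over the list of split paths, grouping the suffix lists by first component with one flat dict per level and recursing on the non-empty suffixes.
import Mathlib
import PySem

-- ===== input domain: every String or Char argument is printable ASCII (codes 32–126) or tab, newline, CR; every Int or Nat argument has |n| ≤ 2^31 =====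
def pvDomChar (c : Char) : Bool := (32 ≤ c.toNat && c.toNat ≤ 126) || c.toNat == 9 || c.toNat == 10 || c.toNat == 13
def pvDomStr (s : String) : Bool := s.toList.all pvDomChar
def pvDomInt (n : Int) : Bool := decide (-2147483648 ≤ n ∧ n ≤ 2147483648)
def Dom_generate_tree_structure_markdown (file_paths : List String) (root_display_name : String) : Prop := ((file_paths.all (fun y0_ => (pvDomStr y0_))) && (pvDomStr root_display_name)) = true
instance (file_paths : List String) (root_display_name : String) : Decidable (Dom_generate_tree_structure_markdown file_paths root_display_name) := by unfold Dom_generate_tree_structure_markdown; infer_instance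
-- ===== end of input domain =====

-- B replaces A's nested-dict tree building with a direct recursion over the split paths
-- (group by first component, recurse on the suffixes); same output, no speed claim.

-- ===== PORT A =====

def pySplitSlash (p : String) : List String :=
  (PySem.Chars.splitOn p.toList ['/']).map String.ofList

inductive Trie where
  | nil : Trie
  | cons : String → Trie → Trie → Trie
deriving DecidableEq, Repr

def insertPath : Trie → List String → Trie
  | t, [] => t
  | .nil, p :: ps => .cons p (insertPath .nil ps) .nil
  | .cons q c rest, p :: ps =>
      if q = p then .cons q (insertPath c ps) rest
      else .cons q c (insertPath rest (p :: ps))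
termination_by t ps => (ps.length, sizeOf t)

def trieKeys : Trie → List String
  | .nil => []
  | .cons q _ rest => q :: trieKeys rest

def trieGet : Trie → String → Trie
  | .nil, _ => .nil
  | .cons q c rest, k => if q = k then c else trieGet rest k

-- termination helper for buildLines (cited in decreasing_by)
theorem trieGet_sizeOf_lt (t : Trie) (k : String) (h : trieGet t k ≠ .nil) :
    sizeOf (trieGet t k) < sizeOf t := by
  induction t with
  | nil => simp [trieGet] at h
  | cons q c rest ihc ihr =>
      simp only [trieGet] at h ⊢
      by_cases hq : q = k
      · simp only [hq, if_pos] at h ⊢; simp; omega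
      · simp only [hq, if_neg, not_false_iff] at h ⊢
        have := ihr h; simp; omega

def buildLines (t : Trie) (entries : List String) (pref : List Char) : List String :=
  match entries with
  | [] => []
  | name :: rest =>
    let isLast := rest.isEmpty
    let connector : List Char := if isLast then "└── ".toList else "├── ".toList
    let child := trieGet t name
    String.ofList (pref ++ connector ++ name.toList) ::
      ((if h : child ≠ Trie.nil then
          buildLines child (PySem.List.sorted (trieKeys child) (fun x => x) false)
            (pref ++ (if isLast then "    ".toList else "│   ".toList))
        else []) ++ buildLines t rest pref)
termination_by (sizeOf t, entries.length)
decreasing_by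
  · exact Prod.Lex.left _ _ (trieGet_sizeOf_lt t name h)
  · exact Prod.Lex.right _ (by simp)

def generate_tree_structure_markdown (file_paths : List String) (root_display_name : String) : String :=
  let pathMap := (PySem.List.sorted file_paths (fun x => x) false).foldl
      (fun t p => insertPath t (pySplitSlash p)) Trie.nil
  let body := buildLines pathMap (PySem.List.sorted (trieKeys pathMap) (fun x => x) false) []
  PySem.Str.join "\n" ("```text" :: root_display_name :: (body ++ ["```"]))

-- ===== PORT B =====
def pathsSize (paths : List (List String)) : Nat := (paths.map List.length).sum

-- proof/termination helpers: the suffixes of the paths beginning with a given component,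
-- and the non-empty ones among them (cited by renderB's decreasing_by)
def tailsOf (k : String) (l : List (List String)) : List (List String) :=
  l.filterMap (fun p => match p with
    | x :: ys => if x = k then some ys else none
    | [] => none)

def childrenOf (name : String) (paths : List (List String)) : List (List String) :=
  paths.filterMap (fun p => match p with
    | x :: y :: ys => if x = name then some (y :: ys) else none
    | _ => none)

theorem pathsSize_childrenOf_le (name : String) (paths : List (List String)) :
    pathsSize (childrenOf name paths) + (childrenOf name paths).length ≤ pathsSize paths := by
  induction paths with
  | nil => simp [childrenOf, pathsSize]
  | cons p rest ih =>
      match p with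
      | [] => simp [childrenOf, pathsSize] at ih ⊢; omega
      | [x] => simp [childrenOf, pathsSize] at ih ⊢; omega
      | x :: y :: ys =>
          by_cases hx : x = name
          · simp [childrenOf, pathsSize, hx] at ih ⊢; omega
          · simp [childrenOf, pathsSize, hx] at ih ⊢; omega

theorem pathsSize_childrenOf_lt (name : String) (paths : List (List String))
    (h : childrenOf name paths ≠ []) : pathsSize (childrenOf name paths) < pathsSize paths := by
  have := pathsSize_childrenOf_le name paths
  have hl : 0 < (childrenOf name paths).length := List.length_pos_iff.mpr h
  omega

-- groups = {}; for p in paths: groups.setdefault(p[0], []).append(p[1:])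
-- (paths are always non-empty component lists, so the [] branch is dead)
def groupOf (paths : List (List String)) : PySem.Dict String (List (List String)) :=
  paths.foldl (fun d p => match p with
    | x :: ys => PySem.Dict.modify d x [] (· ++ [ys])
    | [] => d) PySem.Dict.empty

theorem getD_group_foldl (l : List (List String)) (d : PySem.Dict String (List (List String)))
    (k : String) :
    PySem.Dict.getD (l.foldl (fun d p => match p with
      | x :: ys => PySem.Dict.modify d x [] (· ++ [ys])
      | [] => d) d) k [] = PySem.Dict.getD d k [] ++ tailsOf k l := by
  induction l generalizing d with
  | nil => simp [tailsOf]
  | cons p l' ih =>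
      match p with
      | [] => simp [tailsOf, List.foldl, ih]
      | x :: ys =>
          simp only [List.foldl, ih, PySem.Dict.getD_modify]
          by_cases hk : k = x
          · subst hk; simp [tailsOf, List.filterMap_cons]
          · have hxk : ¬ x = k := fun h => hk h.symm
            simp [tailsOf, List.filterMap_cons, hk, hxk]

theorem getD_groupOf (paths : List (List String)) (k : String) :
    PySem.Dict.getD (groupOf paths) k [] = tailsOf k paths := by
  rw [groupOf, getD_group_foldl]
  simp [PySem.Dict.getD_empty]

theorem tailsOf_filter (k : String) (l : List (List String)) :
    (tailsOf k l).filter (fun p => !p.isEmpty) = childrenOf k l := by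
  induction l with
  | nil => rfl
  | cons p l' ih =>
      match p with
      | [] => simp [tailsOf, childrenOf, List.filterMap_cons] at ih ⊢; exact ih
      | [x] =>
          by_cases hx : x = k <;>
            simp [tailsOf, childrenOf, List.filterMap_cons, hx] at ih ⊢ <;> exact ih
      | x :: y :: ys =>
          by_cases hx : x = k <;>
            simp [tailsOf, childrenOf, List.filterMap_cons, hx] at ih ⊢ <;> exact ih

theorem groupChildren_eq (name : String) (paths : List (List String)) :
    (PySem.Dict.getD (groupOf paths) name []).filter (fun s => !s.isEmpty) =
      childrenOf name paths := by
  rw [getD_groupOf, tailsOf_filter]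

theorem pathsSize_groupChildren_lt (name : String) (paths : List (List String))
    (h : (PySem.Dict.getD (groupOf paths) name []).filter (fun s => !s.isEmpty) ≠ []) :
    pathsSize ((PySem.Dict.getD (groupOf paths) name []).filter (fun s => !s.isEmpty)) <
      pathsSize paths := by
  rw [groupChildren_eq] at h ⊢
  exact pathsSize_childrenOf_lt name paths h

def renderB (paths : List (List String)) (names : List String) (pref : List Char) : List String :=
  match names with
  | [] => []
  | name :: rest =>
    let isLast := rest.isEmpty
    let connector : List Char := if isLast then "└── ".toList else "├── ".toList
    let children := (PySem.Dict.getD (groupOf paths) name []).filter (fun s => !s.isEmpty)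
    String.ofList (pref ++ connector ++ name.toList) ::
      ((if h : children ≠ [] then
          renderB children (PySem.List.sorted (PySem.Dict.keys (groupOf children)) (fun x => x) false)
            (pref ++ (if isLast then "    ".toList else "│   ".toList))
        else []) ++ renderB paths rest pref)
termination_by (pathsSize paths, names.length)
decreasing_by
  · exact Prod.Lex.left _ _ (pathsSize_groupChildren_lt name paths h)
  · exact Prod.Lex.right _ (by simp)

def generate_tree_structure_markdown_alt (file_paths : List String) (root_display_name : String) : String :=
  let paths := (PySem.List.sorted file_paths (fun x => x) false).map pySplitSlash
  let body := renderB paths (PySem.List.sorted (PySem.Dict.keys (groupOf paths)) (fun x => x) false) []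
  PySem.Str.join "\n" ("```text" :: root_display_name :: (body ++ ["```"]))

-- ===== PRECONDITION & SPEC =====
def Spec_generate_tree_structure_markdown (file_paths : List String) (root_display_name : String) (out : String) : Prop := out = generate_tree_structure_markdown_alt file_paths root_display_name
instance (file_paths : List String) (root_display_name : String) (out : String) : Decidable (Spec_generate_tree_structure_markdown file_paths root_display_name out) := by unfold Spec_generate_tree_structure_markdown; infer_instance

-- ===== CLAIM (what is proved, stated in full; the proofs are below) =====
def Claim_equal_generate_tree_structure_markdown : Prop := ∀ (file_paths : List String) (root_display_name : String), Dom_generate_tree_structure_markdown file_paths root_display_name → Spec_generate_tree_structure_markdown file_paths root_display_name (generate_tree_structure_markdown file_paths root_display_name)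

-- ===== LEMMAS AND PROOFS =====

theorem insertPath_nil_path (t : Trie) : insertPath t [] = t := by
  cases t <;> simp [insertPath]

theorem trieKeys_insertPath (t : Trie) (p : String) (ps : List String) :
    trieKeys (insertPath t (p :: ps)) =
      if p ∈ trieKeys t then trieKeys t else trieKeys t ++ [p] := by
  induction t with
  | nil => simp [insertPath, trieKeys]
  | cons q c rest ihc ihr =>
      by_cases hq : q = p
      · simp [insertPath, hq, trieKeys]
      · simp [insertPath, hq, trieKeys, ihr, Ne.symm hq]
        split_ifs <;> simp

theorem nodup_trieKeys_insertPath (t : Trie) (ps : List String)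
    (h : (trieKeys t).Nodup) : (trieKeys (insertPath t ps)).Nodup := by
  cases ps with
  | nil => simpa [insertPath_nil_path]
  | cons p ps =>
      rw [trieKeys_insertPath]
      split_ifs with hm
      · exact h
      · refine List.Nodup.append h (List.nodup_singleton p) ?_
        intro a ha hb
        simp only [List.mem_singleton] at hb
        exact hm (hb ▸ ha)

theorem trieGet_insertPath (t : Trie) (p : String) (ps : List String) (k : String) :
    trieGet (insertPath t (p :: ps)) k =
      if k = p then insertPath (trieGet t p) ps else trieGet t k := by
  induction t with
  | nil =>
      simp only [insertPath, trieGet]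
      by_cases hk : k = p
      · simp [hk]
      · simp [hk, Ne.symm hk]
  | cons q c rest ihc ihr =>
      by_cases hq : q = p
      · subst hq
        simp only [insertPath, if_pos rfl]
        by_cases hk : k = q
        · subst hk; simp [trieGet]
        · have hqk : ¬ q = k := fun h => hk h.symm
          simp [trieGet, hk, hqk]
      · simp only [insertPath, if_neg hq, trieGet, ihr]
        by_cases hqk : q = k
        · subst hqk
          have hkp : ¬ q = p := hq
          simp [trieGet, hkp]
        · simp [trieGet, hqk, ihr]

theorem trieGet_foldl (l : List (List String)) (t : Trie) (k : String) :
    trieGet (l.foldl insertPath t) k = (tailsOf k l).foldl insertPath (trieGet t k) := by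
  induction l generalizing t with
  | nil => simp [tailsOf]
  | cons p l' ih =>
      match p with
      | [] => simp [tailsOf, List.foldl, insertPath_nil_path, ih]
      | x :: ys =>
          simp only [List.foldl, ih, trieGet_insertPath]
          by_cases hx : x = k
          · subst hx; simp [tailsOf, List.filterMap_cons]
          · have hkx : ¬ k = x := fun h => hx h.symm
            simp [tailsOf, List.filterMap_cons, hx, hkx]

theorem foldl_insert_drop_nils (l : List (List String)) (t : Trie) :
    l.foldl insertPath t = (l.filter (fun p => !p.isEmpty)).foldl insertPath t := by
  induction l generalizing t with
  | nil => rfl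
  | cons p l' ih =>
      match p with
      | [] => simp [List.foldl, insertPath_nil_path, ih]
      | x :: ys => simp [List.foldl, ih]

theorem trieGet_trieOf (l : List (List String)) (k : String) :
    trieGet (l.foldl insertPath Trie.nil) k = (childrenOf k l).foldl insertPath Trie.nil := by
  rw [trieGet_foldl, show trieGet Trie.nil k = Trie.nil from rfl,
    foldl_insert_drop_nils, tailsOf_filter]

theorem mem_trieKeys_foldl (l : List (List String)) (t : Trie) (x : String) :
    x ∈ trieKeys (l.foldl insertPath t) ↔ x ∈ trieKeys t ∨ x ∈ l.filterMap List.head? := by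
  induction l generalizing t with
  | nil => simp
  | cons p l' ih =>
      match p with
      | [] => simp [List.foldl, insertPath_nil_path, ih]
      | y :: ys =>
          have hfm : List.filterMap List.head? ((y :: ys) :: l') = y :: List.filterMap List.head? l' := by
            simp
          simp only [List.foldl, ih, trieKeys_insertPath, hfm, List.mem_cons]
          split_ifs with hm
          · by_cases hxy : x = y
            · subst hxy; simp [hm]
            · simp [hxy]
          · simp only [List.mem_append, List.mem_singleton]
            tauto

theorem nodup_trieKeys_foldl (l : List (List String)) (t : Trie)
    (h : (trieKeys t).Nodup) : (trieKeys (l.foldl insertPath t)).Nodup := by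
  induction l generalizing t with
  | nil => exact h
  | cons p l' ih => exact ih _ (nodup_trieKeys_insertPath _ _ h)

theorem insertPath_ne_nil (t : Trie) (p : String) (ps : List String) :
    insertPath t (p :: ps) ≠ Trie.nil := by
  cases t <;> simp [insertPath] <;> split_ifs <;> simp

theorem insertPath_ne_nil' (t : Trie) (ps : List String) (h : t ≠ Trie.nil) :
    insertPath t ps ≠ Trie.nil := by
  cases ps with
  | nil => simpa [insertPath_nil_path]
  | cons p ps => exact insertPath_ne_nil t p ps

theorem foldl_insert_ne_nil (l : List (List String)) (t : Trie) (h : t ≠ Trie.nil) :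
    l.foldl insertPath t ≠ Trie.nil := by
  induction l generalizing t with
  | nil => exact h
  | cons p l' ih => exact ih _ (insertPath_ne_nil' _ _ h)

theorem trieOf_eq_nil_iff (l : List (List String)) (h : ∀ p ∈ l, p ≠ []) :
    l.foldl insertPath Trie.nil = Trie.nil ↔ l = [] := by
  cases l with
  | nil => simp
  | cons p l' =>
      simp only [List.foldl]
      have hp : insertPath Trie.nil p ≠ Trie.nil := by
        match p, h p (by simp) with
        | x :: ys, _ => exact insertPath_ne_nil _ x ys
      have h2 := foldl_insert_ne_nil l' _ hp
      simp [h2]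

theorem childrenOf_ne_nil_mem (k : String) (l : List (List String)) :
    ∀ q ∈ childrenOf k l, q ≠ [] := by
  intro q hq
  simp only [childrenOf, List.mem_filterMap] at hq
  obtain ⟨p, _, hp⟩ := hq
  match p with
  | [] => simp at hp
  | [x] => simp at hp
  | x :: y :: ys =>
      simp only at hp
      split_ifs at hp
      cases hp
      simp

theorem mem_keys_group_foldl (l : List (List String))
    (d : PySem.Dict String (List (List String))) (x : String) :
    x ∈ PySem.Dict.keys (l.foldl (fun d p => match p with
      | x :: ys => PySem.Dict.modify d x [] (· ++ [ys])
      | [] => d) d) ↔ x ∈ PySem.Dict.keys d ∨ x ∈ l.filterMap List.head? := by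
  induction l generalizing d with
  | nil => simp
  | cons p l' ih =>
      match p with
      | [] => simp [List.foldl, ih]
      | y :: ys =>
          have hfm : List.filterMap List.head? ((y :: ys) :: l') = y :: List.filterMap List.head? l' := by
            simp
          simp only [List.foldl, ih, hfm, List.mem_cons, PySem.Dict.keys_modify,
            PySem.Dict.mem_keys_insert]
          tauto

theorem nodup_keys_group_foldl (l : List (List String))
    (d : PySem.Dict String (List (List String))) (h : (PySem.Dict.keys d).Nodup) :
    (PySem.Dict.keys (l.foldl (fun d p => match p with
      | x :: ys => PySem.Dict.modify d x [] (· ++ [ys])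
      | [] => d) d)).Nodup := by
  induction l generalizing d with
  | nil => exact h
  | cons p l' ih =>
      match p with
      | [] => exact ih d h
      | y :: ys =>
          refine ih _ ?_
          rw [PySem.Dict.keys_modify]
          by_cases hc : PySem.Dict.contains d y
          · rwa [PySem.Dict.keys_insert_of_contains _ _ hc]
          · rw [PySem.Dict.keys_insert_of_not_contains _ _ (by simpa using hc)]
            refine List.Nodup.append h (List.nodup_singleton y) ?_
            intro a ha hb
            simp only [List.mem_singleton] at hb
            subst hb
            exact hc ((PySem.Dict.contains_iff_mem_keys d a).mpr ha)

theorem sortedKeys_eq (l : List (List String)) :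
    PySem.List.sorted (trieKeys (l.foldl insertPath Trie.nil)) (fun x => x) false =
      PySem.List.sorted (PySem.Dict.keys (groupOf l)) (fun x => x) false := by
  unfold groupOf
  apply PySem.List.sorted_eq_sorted_of_perm _ _ _ (fun a b hab => hab)
  rw [List.perm_ext_iff_of_nodup (nodup_trieKeys_foldl l Trie.nil (by simp [trieKeys]))
    (nodup_keys_group_foldl l PySem.Dict.empty PySem.Dict.nodup_keys_empty)]
  intro a
  rw [mem_trieKeys_foldl, mem_keys_group_foldl]
  simp [trieKeys]

theorem loopEq (paths : List (List String))
    (IH : ∀ ch, pathsSize ch < pathsSize paths → (∀ p ∈ ch, p ≠ []) → ∀ pref,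
      buildLines (ch.foldl insertPath Trie.nil)
          (PySem.List.sorted (trieKeys (ch.foldl insertPath Trie.nil)) (fun x => x) false) pref =
        renderB ch (PySem.List.sorted (PySem.Dict.keys (groupOf ch)) (fun x => x) false) pref) :
    ∀ names pref, buildLines (paths.foldl insertPath Trie.nil) names pref = renderB paths names pref := by
  intro names
  induction names with
  | nil => intro pref; simp [buildLines, renderB]
  | cons name rest ihn =>
      intro pref
      rw [buildLines, renderB]
      simp only [groupChildren_eq]
      have hchild : trieGet (paths.foldl insertPath Trie.nil) name
          = (childrenOf name paths).foldl insertPath Trie.nil := trieGet_trieOf paths name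
      have hiff : (trieGet (paths.foldl insertPath Trie.nil) name ≠ Trie.nil)
          ↔ (childrenOf name paths ≠ []) := by
        rw [hchild, Ne, trieOf_eq_nil_iff _ (childrenOf_ne_nil_mem name paths)]
      congr 1
      congr 1
      · by_cases hc : childrenOf name paths ≠ []
        · rw [dif_pos (hiff.mpr hc), dif_pos hc, hchild]
          exact IH _ (pathsSize_childrenOf_lt name paths hc) (childrenOf_ne_nil_mem name paths) _
        · rw [dif_neg (fun hx => hc (hiff.mp hx)), dif_neg hc]
      · exact ihn pref

theorem mainEq (n : Nat) : ∀ paths : List (List String), pathsSize paths ≤ n →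
    (∀ p ∈ paths, p ≠ []) → ∀ pref,
    buildLines (paths.foldl insertPath Trie.nil)
        (PySem.List.sorted (trieKeys (paths.foldl insertPath Trie.nil)) (fun x => x) false) pref =
      renderB paths (PySem.List.sorted (PySem.Dict.keys (groupOf paths)) (fun x => x) false) pref := by
  induction n with
  | zero =>
      intro paths hsz hne pref
      rw [sortedKeys_eq paths]
      exact loopEq paths (fun ch hlt _ _ => absurd hlt (by omega)) _ _
  | succ n ihn =>
      intro paths hsz hne pref
      rw [sortedKeys_eq paths]
      refine loopEq paths (fun ch hlt hch pref' => ?_) _ _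
      exact ihn ch (by omega) hch pref'

theorem splitOn_go_ne_nil (sep : List Char) (fuel : Nat) :
    ∀ l cur acc, PySem.Chars.splitOn.go sep fuel l cur acc ≠ [] := by
  induction fuel with
  | zero => intro l cur acc; simp [PySem.Chars.splitOn.go]
  | succ fuel ih =>
      intro l cur acc
      match l with
      | [] => simp [PySem.Chars.splitOn.go]
      | c :: rest =>
          rw [PySem.Chars.splitOn.go]
          split_ifs with h
          · exact ih _ _ _
          · exact ih _ _ _

theorem pySplitSlash_ne_nil (p : String) : pySplitSlash p ≠ [] := by
  simp only [pySplitSlash, Ne, List.map_eq_nil_iff]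
  exact splitOn_go_ne_nil _ _ _ _ _

theorem final (file_paths : List String) (root_display_name : String) :
    generate_tree_structure_markdown file_paths root_display_name =
      generate_tree_structure_markdown_alt file_paths root_display_name := by
  simp only [generate_tree_structure_markdown, generate_tree_structure_markdown_alt]
  rw [← List.foldl_map]
  have hb := mainEq (pathsSize ((PySem.List.sorted file_paths (fun x => x) false).map pySplitSlash))
    ((PySem.List.sorted file_paths (fun x => x) false).map pySplitSlash) le_rfl
    (by intro p hp; simp only [List.mem_map] at hp; obtain ⟨q, _, rfl⟩ := hp; exact pySplitSlash_ne_nil q) []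
  rw [hb]

-- ===== VERDICT (by name: the statement is the Claim_ definition above) =====
theorem generate_tree_structure_markdown_spec : Claim_equal_generate_tree_structure_markdown := by
  intro file_paths root_display_name _
  unfold Spec_generate_tree_structure_markdown
  exact final file_paths root_display_name
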